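-- pv_equiv track=rewrite | github.com/pikulet/projecteuler | 028.py | corner_sum
-- ===== SOURCE A (Python) =====
-- def corner_sum(n):
--     result = 0
--     length = 2*n - 1
--     top_sum = length**2
--     for i in range(4):
--         result += top_sum
--         top_sum -= (length - 1)
--     return result
-- ===== SOURCE B (Python) =====
-- def corner_sum(n):
--     length = 2*n - 1
--     return 4*length**2 - 6*(length - 1)
-- ===== Notes on version B (the rewrite author's own statement) =====
-- stated objective: simpler
-- what changed: Replaced the accumulation loop over the corners with a single closed-form arithmetic expression in the ring side length.
import Mathlib
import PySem

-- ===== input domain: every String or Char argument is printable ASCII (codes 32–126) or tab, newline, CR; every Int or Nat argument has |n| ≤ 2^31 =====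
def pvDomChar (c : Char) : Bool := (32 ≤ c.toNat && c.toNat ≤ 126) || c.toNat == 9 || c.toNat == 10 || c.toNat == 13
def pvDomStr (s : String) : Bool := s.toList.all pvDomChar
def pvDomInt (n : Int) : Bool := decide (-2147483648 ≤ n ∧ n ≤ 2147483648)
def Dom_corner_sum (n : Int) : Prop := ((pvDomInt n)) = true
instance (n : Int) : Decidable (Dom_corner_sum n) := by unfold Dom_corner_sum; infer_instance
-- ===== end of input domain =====

-- ===== PORT A =====
-- literal port of A: result accumulates top_sum over range(4), top_sum decreasing by (length-1)
def corner_sum (n : Int) : Int :=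
  let length := 2*n - 1
  let s := (PySem.List.pyRange 0 4 1).foldl
    (fun (st : Int × Int) _ => (st.1 + st.2, st.2 - (length - 1))) (0, length^2)
  s.1

-- ===== PORT B =====
-- B: closed-form sum of the four corners; simpler, no loop
def corner_sum_alt (n : Int) : Int :=
  let length := 2*n - 1
  4*length^2 - 6*(length - 1)

-- ===== PRECONDITION & SPEC =====
def Spec_corner_sum (n : Int) (out : Int) : Prop := out = corner_sum_alt n
instance (n : Int) (out : Int) : Decidable (Spec_corner_sum n out) := by unfold Spec_corner_sum; infer_instance

-- ===== CLAIM (what is proved, stated in full; the proofs are below) =====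
def Claim_equal_corner_sum : Prop := ∀ (n : Int), Dom_corner_sum n → Spec_corner_sum n (corner_sum n)

-- ===== LEMMAS AND PROOFS =====

-- ===== VERDICT (by name: the statement is the Claim_ definition above) =====
theorem corner_sum_spec : Claim_equal_corner_sum := by
  intro n _
  unfold Spec_corner_sum corner_sum corner_sum_alt
  simp [PySem.List.pyRange, List.range_succ]
  ring
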